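-- pv_equiv track=rewrite | github.com/xN03Lx/pokemon-app | app/pokemon/services.py | get_evolutions
-- ===== SOURCE A (Python) =====
-- def get_evolutions(pokemon, evolution_chains_list):
--     index_pokemon = evolution_chains_list.index(pokemon)
--     evolutions = []
--     for index, evolution in enumerate(evolution_chains_list):
--         if index_pokemon != index:
--             evolution_type = ''
--             if index_pokemon < index:
--                 evolution_type = "Evolution"
--             if index_pokemon > index:
--                 evolution_type = "Preevolution"
--             evolutions.append({
--                 "type": evolution_type,
--                 "name": evolution
--             })
--     return evolutions
-- ===== SOURCE B (Python) =====
-- def get_evolutions(pokemon, evolution_chains_list):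
--     seen = False
--     evolutions = []
--     for name in evolution_chains_list:
--         if not seen and name == pokemon:
--             seen = True
--         else:
--             evolutions.append({
--                 "type": "Evolution" if seen else "Preevolution",
--                 "name": name
--             })
--     if not seen:
--         raise ValueError(f"{pokemon!r} is not in list")
--     return evolutions
-- ===== Notes on version B (the rewrite author's own statement) =====
-- stated objective: alternative
-- what changed: B removes the preliminary .index() scan entirely: a single forward pass maintains a boolean `seen` flag, skipping the first occurrence of pokemon and tagging each other element Preevolution/Evolution according to whether the flag is set, raising ValueError after the loop if pokemon never occurred.
import Mathlib
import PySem

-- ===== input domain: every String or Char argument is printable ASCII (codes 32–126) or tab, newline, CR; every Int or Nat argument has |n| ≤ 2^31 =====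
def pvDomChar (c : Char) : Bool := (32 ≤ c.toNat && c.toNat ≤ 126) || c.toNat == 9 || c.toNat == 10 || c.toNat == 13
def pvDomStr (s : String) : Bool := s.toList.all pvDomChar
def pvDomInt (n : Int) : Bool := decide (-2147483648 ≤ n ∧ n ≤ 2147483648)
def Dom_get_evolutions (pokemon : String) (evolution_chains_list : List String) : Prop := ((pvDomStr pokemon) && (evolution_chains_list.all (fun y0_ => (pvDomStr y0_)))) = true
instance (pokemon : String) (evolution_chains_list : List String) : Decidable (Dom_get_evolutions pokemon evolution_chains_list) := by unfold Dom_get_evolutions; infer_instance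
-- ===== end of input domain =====

-- B replaces A's `.index()`-then-compare-indices scheme with a single forward pass
-- keeping a boolean `seen` flag, no index arithmetic at all (objective: alternative).


-- ===== PORT A =====
-- A's loop body: skip the found index, classify the rest by comparing indices.
def pvStepA (ip : Int) (acc : List (List (String × String))) (p : Int × String) : List (List (String × String)) :=
  if ip ≠ p.1 then
    let t : String := ""
    let t : String := if ip < p.1 then "Evolution" else t
    let t : String := if ip > p.1 then "Preevolution" else t
    acc ++ [[("type", t), ("name", p.2)]]
  else acc

def get_evolutions (pokemon : String) (evolution_chains_list : List String) : List (List (String × String)) :=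
  match PySem.List.index? evolution_chains_list pokemon with
  | none => []  -- Python raises ValueError here; excluded by Pre_
  | some index_pokemon =>
    (PySem.List.enumerate evolution_chains_list 0).foldl (pvStepA (index_pokemon : Int)) []

-- ===== PORT B =====
-- B's loop body: state is (seen flag, accumulated rows).
def pvStepB (pokemon : String) (st : Bool × List (List (String × String))) (n : String) :
    Bool × List (List (String × String)) :=
  if !st.1 && n == pokemon then (true, st.2)
  else (st.1, st.2 ++ [[("type", if st.1 then "Evolution" else "Preevolution"), ("name", n)]])

def get_evolutions_alt (pokemon : String) (evolution_chains_list : List String) : List (List (String × String)) :=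
  -- if the flag is still false after the loop Python raises ValueError; excluded by Pre_
  (evolution_chains_list.foldl (pvStepB pokemon) (false, [])).2

-- ===== PRECONDITION & SPEC =====
-- Pre_ excludes exactly the inputs where Python raises ValueError (pokemon absent from the list).
def Pre_get_evolutions (pokemon : String) (evolution_chains_list : List String) : Prop :=
  pokemon ∈ evolution_chains_list
instance (pokemon : String) (evolution_chains_list : List String) : Decidable (Pre_get_evolutions pokemon evolution_chains_list) := by unfold Pre_get_evolutions; infer_instance
def pvWitness_get_evolutions : String × List String := ("b", ["a", "b", "c"])

def Spec_get_evolutions (pokemon : String) (evolution_chains_list : List String) (out : List (List (String × String))) : Prop := out = get_evolutions_alt pokemon evolution_chains_list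
instance (pokemon : String) (evolution_chains_list : List String) (out : List (List (String × String))) : Decidable (Spec_get_evolutions pokemon evolution_chains_list out) := by unfold Spec_get_evolutions; infer_instance

-- ===== CLAIM (what is proved, stated in full; the proofs are below) =====
def Claim_equal_get_evolutions : Prop := ∀ (pokemon : String) (evolution_chains_list : List String), Dom_get_evolutions pokemon evolution_chains_list → Pre_get_evolutions pokemon evolution_chains_list → Spec_get_evolutions pokemon evolution_chains_list (get_evolutions pokemon evolution_chains_list)

-- ===== LEMMAS AND PROOFS =====

-- A side: all indices of `l` lie strictly below `ip` — every element is a Preevolution.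
theorem pvFoldl_pre (l : List String) (s ip : Int) (acc : List (List (String × String)))
    (h : s + l.length ≤ ip) :
    (PySem.List.enumerate l s).foldl (pvStepA ip) acc
      = acc ++ l.map (fun n => [("type", "Preevolution"), ("name", n)]) := by
  induction l generalizing s acc with
  | nil => simp [PySem.List.enumerate_nil]
  | cons x xs ih =>
    rw [PySem.List.enumerate_cons, List.foldl_cons]
    have hs : s < ip := by simp at h; omega
    rw [ih (s + 1) _ (by simp at h ⊢; omega)]
    simp [pvStepA, hs, ne_of_gt hs]

-- A side: all indices of `l` lie strictly above `ip` — every element is an Evolution.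
theorem pvFoldl_post (l : List String) (s ip : Int) (acc : List (List (String × String)))
    (h : ip < s) :
    (PySem.List.enumerate l s).foldl (pvStepA ip) acc
      = acc ++ l.map (fun n => [("type", "Evolution"), ("name", n)]) := by
  induction l generalizing s acc with
  | nil => simp [PySem.List.enumerate_nil]
  | cons x xs ih =>
    rw [PySem.List.enumerate_cons, List.foldl_cons]
    rw [ih (s + 1) _ (by omega)]
    simp [pvStepA, h, not_lt.mpr (le_of_lt h), ne_of_lt h]

-- B side: once the flag is true every element is tagged Evolution.
theorem pvFoldlB_seen (p : String) (l : List String) (acc : List (List (String × String))) :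
    l.foldl (pvStepB p) (true, acc)
      = (true, acc ++ l.map (fun n => [("type", "Evolution"), ("name", n)])) := by
  induction l generalizing acc with
  | nil => simp
  | cons x xs ih => simp [pvStepB, ih]

-- B side: while `p` has not appeared, every element is tagged Preevolution and the flag stays false.
theorem pvFoldlB_unseen (p : String) (l : List String) (acc : List (List (String × String)))
    (h : p ∉ l) :
    l.foldl (pvStepB p) (false, acc)
      = (false, acc ++ l.map (fun n => [("type", "Preevolution"), ("name", n)])) := by
  induction l generalizing acc with
  | nil => simp
  | cons x xs ih =>
    have hx : x ≠ p := fun e => h (by simp [e])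
    simp only [List.foldl_cons, pvStepB, Bool.not_false, Bool.true_and,
      beq_iff_eq, hx, if_false]
    rw [ih _ (fun m => h (List.mem_cons_of_mem _ m))]
    simp

-- ===== VERDICT (by name: the statement is the Claim_ definition above) =====
theorem get_evolutions_spec : Claim_equal_get_evolutions := by
  intro pokemon xs _ hpre
  unfold Spec_get_evolutions
  have hsome : (PySem.List.index? xs pokemon).isSome := (PySem.List.index?_isSome_iff _ _).mpr hpre
  obtain ⟨k, hk⟩ := Option.isSome_iff_exists.mp hsome
  obtain ⟨pre, suf, hxs, hlen, hnm⟩ := (PySem.List.index?_eq_some_iff _ _ _).mp hk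
  subst hxs
  simp only [get_evolutions, get_evolutions_alt, hk]
  -- A side: split the enumerate fold at the found index
  rw [PySem.List.enumerate_append, List.foldl_append, PySem.List.enumerate_cons,
    List.foldl_cons]
  rw [pvFoldl_pre pre 0 k [] (by simp [hlen])]
  have hstep : pvStepA (k : Int)
      (([] : List (List (String × String))) ++ pre.map (fun n => [("type", "Preevolution"), ("name", n)]))
      ((0 + (pre.length : Int)), pokemon)
      = pre.map (fun n => [("type", "Preevolution"), ("name", n)]) := by
    simp [pvStepA, hlen]
  rw [hstep, pvFoldl_post suf (0 + (pre.length : Int) + 1) k _ (by omega)]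
  -- B side: fold over pre (flag false), hit pokemon (flag flips), fold over suf (flag true)
  rw [List.foldl_append, List.foldl_cons, pvFoldlB_unseen pokemon pre [] hnm]
  simp only [pvStepB, Bool.not_false, Bool.true_and, beq_self_eq_true, if_true]
  rw [pvFoldlB_seen]
  simp
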